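-- pv_equiv track=rewrite | github.com/kcaHnaM/Python_Multithreading_JJGR- | 7-MultiplicacionMatrices.py | Aux
-- ===== SOURCE A (Python) =====
-- def Aux(N):
--     C = []
--     m_aux = 0
--     for i in range(0, N):
--         aux0 = []
--         for j in range(0, N):
--             aux1 = []
--             for k in range(0, N):
--                 aux1.append(m_aux)
--                 m_aux += 1
--             aux0.append(aux1)
--         C.append(aux0)
--     return C
-- ===== SOURCE B (Python) =====
-- def Aux(N):
--     # Treat nonpositive sizes as empty; build the flat sequence 0..n^3-1 once,
--     # then reshape it into the n x n x n structure by two slicing passes.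
--     n = max(N, 0)
--     flat = list(range(n * n * n))
--     rows = [flat[t * n:(t + 1) * n] for t in range(n * n)]
--     return [rows[t * n:(t + 1) * n] for t in range(n)]
-- ===== Notes on version B (the rewrite author's own statement) =====
-- stated objective: alternative
-- what changed: Instead of three nested loops threading a running counter, B builds the flat sequence range(n**3) once (n = max(N,0)) and reshapes it into the n x n x n structure by two staged slicing passes (flatten-then-chunk), with no nested loops and no mutable accumulator.
import Mathlib
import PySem

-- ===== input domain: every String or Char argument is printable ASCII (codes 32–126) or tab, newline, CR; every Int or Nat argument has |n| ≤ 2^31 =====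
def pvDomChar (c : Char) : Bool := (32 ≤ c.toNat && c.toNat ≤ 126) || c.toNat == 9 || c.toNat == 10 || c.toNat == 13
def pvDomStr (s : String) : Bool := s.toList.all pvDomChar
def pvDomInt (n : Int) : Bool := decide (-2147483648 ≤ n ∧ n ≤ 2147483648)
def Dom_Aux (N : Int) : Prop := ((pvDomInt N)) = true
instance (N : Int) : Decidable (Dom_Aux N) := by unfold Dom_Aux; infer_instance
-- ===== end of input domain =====

-- B builds the flat sequence range(N^3) once and reshapes it by two slicing passes
-- (flatten-then-chunk), instead of A's three nested loops threading a running counter.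

-- ===== PORT A =====
-- A's three loop bodies, as named step functions over the loop state (list built so far, m_aux).
def pvStep1 (st1 : List Int × Int) (_k : Int) : List Int × Int :=
  (st1.1 ++ [st1.2], st1.2 + 1)

def pvStep2 (l : List Int) (st0 : List (List Int) × Int) (_j : Int) : List (List Int) × Int :=
  let row := l.foldl pvStep1 ([], st0.2)
  (st0.1 ++ [row.1], row.2)

def pvStep3 (l : List Int) (st : List (List (List Int)) × Int) (_i : Int) :
    List (List (List Int)) × Int :=
  let inner := l.foldl (pvStep2 l) ([], st.2)
  (st.1 ++ [inner.1], inner.2)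

def Aux (N : Int) : List (List (List Int)) :=
  ((PySem.List.pyRange 0 N 1).foldl (pvStep3 (PySem.List.pyRange 0 N 1)) ([], 0)).1

-- ===== PORT B =====
def Aux_alt (N : Int) : List (List (List Int)) :=
  let n := max N 0
  let flat := PySem.List.pyRange 0 (n * n * n) 1
  let rows := (PySem.List.pyRange 0 (n * n) 1).map
    (fun t => PySem.List.slice flat (some (t * n)) (some ((t + 1) * n)))
  (PySem.List.pyRange 0 n 1).map
    (fun t => PySem.List.slice rows (some (t * n)) (some ((t + 1) * n)))

-- ===== PRECONDITION & SPEC =====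
def Spec_Aux (N : Int) (out : List (List (List Int))) : Prop := out = Aux_alt N
instance (N : Int) (out : List (List (List Int))) : Decidable (Spec_Aux N out) := by unfold Spec_Aux; infer_instance

-- ===== CLAIM (what is proved, stated in full; the proofs are below) =====
def Claim_equal_Aux : Prop := ∀ (N : Int), Dom_Aux N → Spec_Aux N (Aux N)

-- ===== LEMMAS AND PROOFS =====

-- innermost loop of A: appends m, m+1, … and advances the counter by the list length
theorem pv_inner (t : List Int) (acc : List Int) (m : Int) :
    t.foldl pvStep1 (acc, m)
    = (acc ++ (List.range t.length).map (fun (k : Nat) => m + (k : Int)), m + t.length) := by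
  induction t generalizing acc m with
  | nil => simp
  | cons a t ih =>
      rw [List.foldl_cons]
      show t.foldl pvStep1 (acc ++ [m], m + 1) = _
      rw [ih]
      simp only [Prod.mk.injEq, List.length_cons]
      refine ⟨?_, by push_cast; ring⟩
      rw [List.range_succ_eq_map]
      simp only [List.map_cons, List.map_map, Function.comp_def, List.append_assoc]
      congr 1
      simp only [List.cons_append, List.nil_append, Nat.cast_zero]
      congr 1
      · ring
      · apply List.map_congr_left; intro x _; push_cast; ring

-- middle loop of A
theorem pv_mid (l : List Int) (t : List Int) (acc : List (List Int)) (m : Int) :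
    t.foldl (pvStep2 l) (acc, m)
    = (acc ++ (List.range t.length).map (fun (j : Nat) =>
         (List.range l.length).map (fun (k : Nat) => m + (j : Int) * l.length + (k : Int))),
       m + t.length * l.length) := by
  induction t generalizing acc m with
  | nil => simp
  | cons b t ih =>
      rw [List.foldl_cons]
      have h : pvStep2 l (acc, m) b
          = (acc ++ [(List.range l.length).map (fun (k : Nat) => m + (k : Int))], m + l.length) := by
        simp [pvStep2, pv_inner]
      rw [h, ih]
      simp only [Prod.mk.injEq, List.length_cons]
      refine ⟨?_, by push_cast; ring⟩
      rw [List.range_succ_eq_map]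
      simp only [List.map_cons, List.map_map, Function.comp_def, List.append_assoc]
      congr 1
      simp only [List.cons_append, List.nil_append, Nat.cast_zero]
      congr 1
      · apply List.map_congr_left; intro x _; ring_nf
      · apply List.map_congr_left; intro j _
        apply List.map_congr_left; intro k _; push_cast; ring

-- outer loop of A
theorem pv_outer (l : List Int) (t : List Int) (acc : List (List (List Int))) (m : Int) :
    t.foldl (pvStep3 l) (acc, m)
    = (acc ++ (List.range t.length).map (fun (i : Nat) =>
         (List.range l.length).map (fun (j : Nat) =>
           (List.range l.length).map (fun (k : Nat) =>
             m + (i : Int) * (l.length * l.length) + (j : Int) * l.length + (k : Int)))),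
       m + t.length * (l.length * l.length)) := by
  induction t generalizing acc m with
  | nil => simp
  | cons b t ih =>
      rw [List.foldl_cons]
      have h : pvStep3 l (acc, m) b
          = (acc ++ [(List.range l.length).map (fun (j : Nat) =>
               (List.range l.length).map (fun (k : Nat) => m + (j : Int) * l.length + (k : Int)))],
             m + l.length * l.length) := by
        simp [pvStep3, pv_mid]
      rw [h, ih]
      simp only [Prod.mk.injEq, List.length_cons]
      refine ⟨?_, by push_cast; ring⟩
      rw [List.range_succ_eq_map]
      simp only [List.map_cons, List.map_map, Function.comp_def, List.append_assoc]
      congr 1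
      simp only [List.cons_append, List.nil_append, Nat.cast_zero]
      congr 1
      · apply List.map_congr_left; intro j _
        apply List.map_congr_left; intro k _; ring_nf
      · apply List.map_congr_left; intro i _
        apply List.map_congr_left; intro j _
        apply List.map_congr_left; intro k _; push_cast; ring

-- chunking a map over a range: taking n elements after dropping u*n of them
theorem pv_chunk {α : Type} (f : Nat → α) (m n u : Nat) (h : (u + 1) * n ≤ m) :
    (((List.range m).map f).drop (u * n)).take n
      = (List.range n).map (fun k => f (u * n + k)) := by
  have h' : u * n + n ≤ m := by nlinarith
  apply List.ext_getElem
  · simp; omega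
  · intro i h1 h2
    simp only [List.getElem_take, List.getElem_drop, List.getElem_map, List.getElem_range]

-- ===== VERDICT (by name: the statement is the Claim_ definition above) =====
theorem Aux_spec : Claim_equal_Aux := by
  intro N _
  unfold Spec_Aux Aux Aux_alt
  by_cases hN : 0 ≤ N
  · have hmax : max N 0 = N := by omega
    simp only [hmax]
    lift N to ℕ using hN with n
    -- both sides as maps over List.range n
    rw [pv_outer]
    have hcube : ((n : Int) * n * n) = ((n * n * n : Nat) : Int) := by push_cast; ring
    have hsq : ((n : Int) * n) = ((n * n : Nat) : Int) := by push_cast; ring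
    rw [hcube, hsq]
    rw [PySem.List.pyRange_one 0 ((n * n * n : Nat) : Int),
        PySem.List.pyRange_one 0 ((n * n : Nat) : Int),
        PySem.List.pyRange_one 0 (n : Int)]
    simp only [Int.sub_zero, Int.toNat_natCast, List.length_map, List.length_range,
      List.map_map, Function.comp_def, List.nil_append, Int.zero_add]
    apply List.map_congr_left
    intro i hi
    simp only [List.mem_range] at hi
    have h1 : ((i : Int) * n) = ((i * n : Nat) : Int) := by push_cast; ring
    have h2 : ((i : Int) + 1) * n = ((i * n : Nat) : Int) + ((n : Nat) : Int) := by push_cast; ring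
    rw [h1, h2, PySem.List.slice_natCast_add, pv_chunk _ (n * n) n i (by nlinarith)]
    apply List.map_congr_left
    intro j hj
    simp only [List.mem_range] at hj
    have h3 : ((i * n + j : Nat) : Int) * n = (((i * n + j) * n : Nat) : Int) := by push_cast; ring
    have h4 : (((i * n + j : Nat) : Int) + 1) * n
        = (((i * n + j) * n : Nat) : Int) + ((n : Nat) : Int) := by push_cast; ring
    rw [h3, h4, PySem.List.slice_natCast_add, pv_chunk _ (n * n * n) n (i * n + j) (by nlinarith)]
    apply List.map_congr_left
    intro k hk
    simp only [List.mem_range] at hk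
    push_cast; ring
  · -- N < 0: the outer range is empty on both sides
    replace hN : N < 0 := by omega
    have hmax : max N 0 = 0 := by omega
    have h : PySem.List.pyRange 0 N 1 = [] := by
      rw [PySem.List.pyRange_one]
      have h0 : (N - 0).toNat = 0 := by omega
      rw [h0]; simp
    rw [h, hmax]
    simp [PySem.List.pyRange]
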